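-- pv_equiv track=rewrite | github.com/Kishu7373/Fantasy-Football | utils/api.py | expand_aliases
-- ===== SOURCE A (Python) =====
-- CANON = {"JAC":"JAX","WAS":"WSH","SFO":"SF","TAM":"TB","NOR":"NO","LA":"LAR","OAK":"LV","STL":"LAR","SD":"LAC"}
--
-- def expand_aliases(abv: str) -> set:
--     a = (abv or "").upper()
--     outs = {a}
--     for k, v in CANON.items():
--         if v == a:
--             outs.add(k)
--         if k == a:
--             outs.add(v)
--     return outs
-- ===== SOURCE B (Python) =====
-- CANON = {"JAC":"JAX","WAS":"WSH","SFO":"SF","TAM":"TB","NOR":"NO","LA":"LAR","OAK":"LV","STL":"LAR","SD":"LAC"}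
--
-- # reverse index built once: canonical value -> list of keys mapping to it
-- REVERSE = {}
-- for _k, _v in CANON.items():
--     REVERSE.setdefault(_v, []).append(_k)
--
-- def expand_aliases(abv: str) -> set:
--     a = (abv or "").upper()
--     outs = {a}
--     if a in CANON:
--         outs.add(CANON[a])
--     for k in REVERSE.get(a, ()):
--         outs.add(k)
--     return outs
-- ===== Notes on version B (the rewrite author's own statement) =====
-- stated objective: simpler
-- what changed: Replaces the per-call scan over all CANON items with two indexed lookups: a forward dict lookup plus a module-level reverse index (value -> list of keys) built once.
import Mathlib
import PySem

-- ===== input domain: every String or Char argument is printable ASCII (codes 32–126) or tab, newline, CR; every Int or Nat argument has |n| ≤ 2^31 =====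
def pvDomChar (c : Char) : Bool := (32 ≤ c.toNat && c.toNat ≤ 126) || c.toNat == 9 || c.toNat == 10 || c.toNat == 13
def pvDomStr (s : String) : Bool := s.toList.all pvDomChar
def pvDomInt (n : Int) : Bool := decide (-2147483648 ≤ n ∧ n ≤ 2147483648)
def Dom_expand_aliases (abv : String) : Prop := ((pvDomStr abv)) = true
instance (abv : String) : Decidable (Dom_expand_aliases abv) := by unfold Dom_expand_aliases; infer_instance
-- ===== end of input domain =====

-- B replaces A's per-call scan over all CANON items with a forward lookup plus a reverse index built once (objective: simpler per-call logic).

-- ===== PORT A =====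
-- CANON as an association list in Python insertion order (shared module constant)
def pvCANON : List (String × String) :=
  [("JAC","JAX"),("WAS","WSH"),("SFO","SF"),("TAM","TB"),("NOR","NO"),
   ("LA","LAR"),("OAK","LV"),("STL","LAR"),("SD","LAC")]

def expand_aliases (abv : String) : List String :=
  let a := PySem.Str.upper (if abv = "" then "" else abv)
  let outs : PySem.Set String := PySem.Set.add PySem.Set.empty a
  pvCANON.foldl (fun outs kv =>
    let outs := if kv.2 = a then PySem.Set.add outs kv.1 else outs
    if kv.1 = a then PySem.Set.add outs kv.2 else outs) outs

-- ===== PORT B =====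
-- REVERSE built once at module scope: value -> list of keys mapping to it (Source B's setdefault/append loop)
def pvREVERSE : PySem.Dict String (List String) :=
  pvCANON.foldl (fun d kv => PySem.Dict.insert d kv.2 (PySem.Dict.getD d kv.2 [] ++ [kv.1])) PySem.Dict.empty

def expand_aliases_alt (abv : String) : List String :=
  let a := PySem.Str.upper (if abv = "" then "" else abv)
  let outs : PySem.Set String := PySem.Set.add PySem.Set.empty a
  let outs := match PySem.Dict.get? (PySem.Dict.ofList pvCANON) a with
    | some v => PySem.Set.add outs v
    | none => outs
  (PySem.Dict.getD pvREVERSE a []).foldl PySem.Set.add outs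

-- ===== PRECONDITION & SPEC =====
def Spec_expand_aliases (abv : String) (out : List String) : Prop := out = expand_aliases_alt abv
instance (abv : String) (out : List String) : Decidable (Spec_expand_aliases abv out) := by unfold Spec_expand_aliases; infer_instance

-- ===== CLAIM (what is proved, stated in full; the proofs are below) =====
def Claim_equal_expand_aliases : Prop := ∀ (abv : String), Dom_expand_aliases abv → Spec_expand_aliases abv (expand_aliases abv)

-- ===== LEMMAS AND PROOFS =====

-- core agreement for an arbitrary upper-cased string a: case split on the 17 strings occurring in CANON
theorem pvCore (a : String) :
    (pvCANON.foldl (fun outs kv =>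
      let outs := if kv.2 = a then PySem.Set.add outs kv.1 else outs
      if kv.1 = a then PySem.Set.add outs kv.2 else outs) (PySem.Set.add PySem.Set.empty a))
    = ((PySem.Dict.getD pvREVERSE a []).foldl PySem.Set.add
        (match PySem.Dict.get? (PySem.Dict.ofList pvCANON) a with
         | some v => PySem.Set.add (PySem.Set.add PySem.Set.empty a) v
         | none => PySem.Set.add PySem.Set.empty a)) := by
  by_cases h1 : a = "JAC"
  · subst h1; decide
  by_cases h2 : a = "WAS"
  · subst h2; decide
  by_cases h3 : a = "SFO"
  · subst h3; decide
  by_cases h4 : a = "TAM"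
  · subst h4; decide
  by_cases h5 : a = "NOR"
  · subst h5; decide
  by_cases h6 : a = "LA"
  · subst h6; decide
  by_cases h7 : a = "OAK"
  · subst h7; decide
  by_cases h8 : a = "STL"
  · subst h8; decide
  by_cases h9 : a = "SD"
  · subst h9; decide
  by_cases h10 : a = "JAX"
  · subst h10; decide
  by_cases h11 : a = "WSH"
  · subst h11; decide
  by_cases h12 : a = "SF"
  · subst h12; decide
  by_cases h13 : a = "TB"
  · subst h13; decide
  by_cases h14 : a = "NO"
  · subst h14; decide
  by_cases h15 : a = "LAR"
  · subst h15; decide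
  by_cases h16 : a = "LV"
  · subst h16; decide
  by_cases h17 : a = "LAC"
  · subst h17; decide
  have hof : PySem.Dict.ofList [("JAC","JAX"),("WAS","WSH"),("SFO","SF"),("TAM","TB"),("NOR","NO"),
   ("LA","LAR"),("OAK","LV"),("STL","LAR"),("SD","LAC")] = PySem.Dict.mk [("JAC","JAX"),("WAS","WSH"),("SFO","SF"),("TAM","TB"),("NOR","NO"),
   ("LA","LAR"),("OAK","LV"),("STL","LAR"),("SD","LAC")] := by decide
  have hrev : pvREVERSE = PySem.Dict.mk
      [("JAX",["JAC"]),("WSH",["WAS"]),("SF",["SFO"]),("TB",["TAM"]),("NO",["NOR"]),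
       ("LAR",["LA","STL"]),("LV",["OAK"]),("LAC",["SD"])] := by decide
  simp [pvCANON, hof, hrev, PySem.Dict.get?_mk_cons, PySem.Dict.getD_eq_get?_getD, PySem.Dict.get?, List.find?,
    List.foldl, beq_iff_eq, Ne.symm h1, beq_eq_false_iff_ne.mpr (Ne.symm h1), Ne.symm h2, beq_eq_false_iff_ne.mpr (Ne.symm h2), Ne.symm h3, beq_eq_false_iff_ne.mpr (Ne.symm h3), Ne.symm h4, beq_eq_false_iff_ne.mpr (Ne.symm h4), Ne.symm h5, beq_eq_false_iff_ne.mpr (Ne.symm h5), Ne.symm h6, beq_eq_false_iff_ne.mpr (Ne.symm h6), Ne.symm h7, beq_eq_false_iff_ne.mpr (Ne.symm h7), Ne.symm h8, beq_eq_false_iff_ne.mpr (Ne.symm h8), Ne.symm h9, beq_eq_false_iff_ne.mpr (Ne.symm h9), Ne.symm h10, beq_eq_false_iff_ne.mpr (Ne.symm h10), Ne.symm h11, beq_eq_false_iff_ne.mpr (Ne.symm h11), Ne.symm h12, beq_eq_false_iff_ne.mpr (Ne.symm h12), Ne.symm h13, beq_eq_false_iff_ne.mpr (Ne.symm h13), Ne.symm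 h14, beq_eq_false_iff_ne.mpr (Ne.symm h14), Ne.symm h15, beq_eq_false_iff_ne.mpr (Ne.symm h15), Ne.symm h16, beq_eq_false_iff_ne.mpr (Ne.symm h16), Ne.symm h17, beq_eq_false_iff_ne.mpr (Ne.symm h17)]

-- ===== VERDICT (by name: the statement is the Claim_ definition above) =====
theorem expand_aliases_spec : Claim_equal_expand_aliases := by
  intro abv _
  show expand_aliases abv = expand_aliases_alt abv
  unfold expand_aliases expand_aliases_alt
  exact pvCore _
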